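-- pv_equiv track=rewrite | github.com/darpham/HackerRank_Challenges | challenges/questionMarks.py | QuestionsMarks
-- ===== SOURCE A (Python) =====
-- def QuestionsMarks(str):
--     strNoAplha = ''
--     for char in str:
--         if not char.isalpha():
--             strNoAplha += char
--     currentChar = ''
--     count = 0
--     for char in strNoAplha:
--         if char.isdigit():
--             if currentChar == '':
--                 currentChar = char
--                 count = 0
--             else:
--                 if int(currentChar) + int(char) == 10:
--                     if count == 3:
--                         return True
--
--                     else:
--                         currentChar = ''
--                         count = 0
--                 else:
--                     currentChar = ''
--                     count = 0
--         else:
--             count += 1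
--     return False
-- ===== SOURCE B (Python) =====
-- def QuestionsMarks(str):
--     # Pass 1: record each digit with the number of non-alpha, non-digit
--     # characters seen since the previously recorded digit.
--     entries = []
--     gap = 0
--     for char in str:
--         if char.isalpha():
--             continue
--         if char.isdigit():
--             entries.append((char, gap))
--             gap = 0
--         else:
--             gap += 1
--     # Pass 2: examine non-overlapping consecutive pairs (0&1, 2&3, ...).
--     i = 0
--     while i + 1 < len(entries):
--         d1, _ = entries[i]
--         d2, g2 = entries[i + 1]
--         if int(d1) + int(d2) == 10 and g2 == 3:
--             return True
--         i += 2
--     return False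
-- ===== Notes on version B (the rewrite author's own statement) =====
-- stated objective: alternative
-- what changed: Replaces A's single stateful scan (pending digit + counter with resets) by a two-pass decomposition: first build a list of (digit, gap-since-previous-digit) entries, then check non-overlapping consecutive pairs for sum 10 and gap 3.
import Mathlib
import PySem

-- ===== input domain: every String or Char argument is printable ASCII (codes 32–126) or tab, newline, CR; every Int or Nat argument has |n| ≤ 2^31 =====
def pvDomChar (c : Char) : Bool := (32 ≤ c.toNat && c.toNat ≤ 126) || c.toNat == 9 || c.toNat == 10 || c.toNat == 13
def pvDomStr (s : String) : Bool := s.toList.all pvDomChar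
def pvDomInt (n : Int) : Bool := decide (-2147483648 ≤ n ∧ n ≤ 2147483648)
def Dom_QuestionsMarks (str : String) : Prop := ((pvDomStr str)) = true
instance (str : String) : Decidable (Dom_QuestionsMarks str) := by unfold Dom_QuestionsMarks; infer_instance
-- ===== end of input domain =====

-- B replaces A's single stateful scan by a two-pass decomposition ((digit,gap) entries, then
-- non-overlapping pair scan); same cost, proved to return the same Bool on every Dom input.


-- int(c) for a one-character digit string; exact for ASCII digit chars '0'..'9'
-- (the only chars it is applied to: both programs guard the call with isdigit, ASCII on Dom).
def pvDigitVal (c : Char) : Int := (c.toNat : Int) - 48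

-- ===== PORT A =====
-- A's second loop: currentChar ('' ↦ none) and count, with early return.
def goA : List Char → Option Char → Nat → Bool
  | [], _, _ => false
  | ch :: rest, cur, count =>
    if PySem.Chars.isdigit ch then
      match cur with
      | none => goA rest (some ch) 0
      | some c =>
        if pvDigitVal c + pvDigitVal ch = 10 then
          if count = 3 then true else goA rest none 0
        else goA rest none 0
    else goA rest cur (count + 1)

def QuestionsMarks (str : String) : Bool :=
  let strNoAlpha := str.toList.filter (fun c => !PySem.Chars.isalpha c)
  goA strNoAlpha none 0

-- ===== PORT B =====
-- Pass 1: (digit, gap-since-previous-digit) entries, skipping alpha chars.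
def entriesB : List Char → Nat → List (Char × Nat)
  | [], _ => []
  | c :: rest, gap =>
    if PySem.Chars.isalpha c then entriesB rest gap
    else if PySem.Chars.isdigit c then (c, gap) :: entriesB rest 0
    else entriesB rest (gap + 1)

-- Pass 2: non-overlapping consecutive pairs (0&1, 2&3, …).
def pairsB : List (Char × Nat) → Bool
  | (d1, _) :: (d2, g2) :: rest =>
    if pvDigitVal d1 + pvDigitVal d2 = 10 ∧ g2 = 3 then true else pairsB rest
  | _ => false

def QuestionsMarks_alt (str : String) : Bool :=
  pairsB (entriesB str.toList 0)

-- ===== PRECONDITION & SPEC =====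
def Spec_QuestionsMarks (str : String) (out : Bool) : Prop := out = QuestionsMarks_alt str
instance (str : String) (out : Bool) : Decidable (Spec_QuestionsMarks str out) := by unfold Spec_QuestionsMarks; infer_instance

-- ===== CLAIM (what is proved, stated in full; the proofs are below) =====
def Claim_equal_QuestionsMarks : Prop := ∀ (str : String), Dom_QuestionsMarks str → Spec_QuestionsMarks str (QuestionsMarks str)

-- ===== LEMMAS AND PROOFS =====

-- entries over the raw list = entries (alpha case removed) over the alpha-filtered list
def entriesB' : List Char → Nat → List (Char × Nat)
  | [], _ => []
  | c :: rest, gap =>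
    if PySem.Chars.isdigit c then (c, gap) :: entriesB' rest 0
    else entriesB' rest (gap + 1)

theorem entriesB_filter (l : List Char) (g : Nat) :
    entriesB l g = entriesB' (l.filter (fun c => !PySem.Chars.isalpha c)) g := by
  induction l generalizing g with
  | nil => rfl
  | cons c rest ih =>
    by_cases ha : PySem.Chars.isalpha c <;>
      simp [entriesB, entriesB', List.filter, ha] <;>
      by_cases hd : PySem.Chars.isdigit c <;>
      simp [hd, ih]

-- the core correspondence between A's scan and B's pair walk, both states at once
theorem goA_pairs (l : List Char) :
    (∀ g1 g2, goA l none g1 = pairsB (entriesB' l g2)) ∧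
    (∀ c cnt x, goA l (some c) cnt = pairsB ((c, x) :: entriesB' l cnt)) := by
  induction l with
  | nil => exact ⟨fun _ _ => rfl, fun _ _ _ => rfl⟩
  | cons ch rest ih =>
    obtain ⟨ih1, ih2⟩ := ih
    constructor
    · intro g1 g2
      by_cases hd : PySem.Chars.isdigit ch
      · simp only [goA, entriesB', hd, if_pos]
        exact ih2 ch 0 g2
      · simp only [goA, entriesB', hd, if_neg, Bool.false_eq_true, not_false_iff]
        exact ih1 (g1 + 1) (g2 + 1)
    · intro c cnt x
      by_cases hd : PySem.Chars.isdigit ch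
      · by_cases hs : pvDigitVal c + pvDigitVal ch = 10
        · by_cases hc : cnt = 3 <;>
            simp [goA, entriesB', pairsB, hd, hs, hc];
            exact ih1 0 0
        · simp [goA, entriesB', pairsB, hd, hs]
          exact ih1 0 0
      · simp only [goA, entriesB', hd, Bool.false_eq_true, if_neg, not_false_iff]
        exact ih2 c (cnt + 1) x

-- ===== VERDICT (by name: the statement is the Claim_ definition above) =====
theorem QuestionsMarks_spec : Claim_equal_QuestionsMarks := by
  intro str _
  unfold Spec_QuestionsMarks QuestionsMarks QuestionsMarks_alt
  rw [entriesB_filter]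
  exact (goA_pairs _).1 0 0
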